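-- pv_equiv track=rewrite | github.com/yeungalan0/misc | advent_of_code_2021/solutions_day4.py | generate_number_dict
-- ===== SOURCE A (Python) =====
-- from typing import Dict, List, Match, Optional, Tuple
--
-- def generate_number_dict(tables: List[List[List[str]]]) -> Dict[str, List[Tuple[int, int, int]]]:
--     number_dict = {}
--
--     for table_number, table in enumerate(tables):
--         for row in range(len(table)):
--             for col in range(len(table[0])):
--                 number_string = table[row][col]
--                 new_value = (table_number, row, col)
--
--                 if number_string not in number_dict:
--                     number_dict[number_string] = []
--
--                 number_dict[number_string].append(new_value)
--
--     return number_dict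
-- ===== SOURCE B (Python) =====
-- def generate_number_dict(tables):
--     pairs = [
--         (table[row][col], (table_number, row, col))
--         for table_number, table in enumerate(tables)
--         for row in range(len(table))
--         for col in range(len(table[0]))
--     ]
--     return {
--         key: [pos for num, pos in pairs if num == key]
--         for key in dict.fromkeys(num for num, _ in pairs)
--     }
-- ===== Notes on version B (the rewrite author's own statement) =====
-- stated objective: alternative
-- what changed: Replaces A's single pass that mutates a dict of lists in place by a flatten-then-group scheme: one comprehension builds the flat (number, position) pair list, dict.fromkeys gives the first-occurrence keys, and each key's positions are collected by filtering the pair list.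
-- outside the precondition, e.g. on generate_number_dict([[['1', '2'], ['3']]]): A raises IndexError, B raises IndexError
import Mathlib
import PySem

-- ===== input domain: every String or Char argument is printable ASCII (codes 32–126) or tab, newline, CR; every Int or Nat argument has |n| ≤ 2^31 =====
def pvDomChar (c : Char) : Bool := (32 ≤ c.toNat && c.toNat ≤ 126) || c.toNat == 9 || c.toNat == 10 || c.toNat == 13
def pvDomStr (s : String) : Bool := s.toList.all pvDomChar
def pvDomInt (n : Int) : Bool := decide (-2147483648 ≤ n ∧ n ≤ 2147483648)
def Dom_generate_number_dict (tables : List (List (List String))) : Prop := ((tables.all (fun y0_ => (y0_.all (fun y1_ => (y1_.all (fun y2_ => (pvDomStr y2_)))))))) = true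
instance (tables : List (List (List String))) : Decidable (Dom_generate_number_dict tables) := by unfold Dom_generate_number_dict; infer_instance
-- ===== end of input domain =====

-- B replaces A's one-pass mutable-dict accumulation by flatten-then-group: build the flat
-- (number, position) pair list once, then a dict comprehension collecting each first-occurrence
-- key's positions by filtering the pair list (objective: alternative, not faster).

-- ===== PORT A =====
def generate_number_dict (tables : List (List (List String))) : List (String × List (Int × Int × Int)) :=
  ((PySem.List.enumerate tables).foldl (fun number_dict tp =>
      (PySem.List.pyRange 0 (tp.2.length : Int) 1).foldl (fun number_dict row =>
        (PySem.List.pyRange 0 ((PySem.List.pyGetD tp.2 0 []).length : Int) 1).foldl (fun number_dict col =>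
          let number_string := PySem.List.pyGetD (PySem.List.pyGetD tp.2 row []) col ""
          let new_value : Int × Int × Int := (tp.1, row, col)
          let number_dict :=
            if number_dict.contains number_string then number_dict
            else number_dict.insert number_string []
          number_dict.modify number_string [] (fun l => l ++ [new_value]))
        number_dict)
      number_dict)
    PySem.Dict.empty).items

-- ===== PORT B =====
def generate_number_dict_alt (tables : List (List (List String))) : List (String × List (Int × Int × Int)) :=
  let pairs := (PySem.List.enumerate tables).flatMap (fun tp =>
    (PySem.List.pyRange 0 (tp.2.length : Int) 1).flatMap (fun row =>
      (PySem.List.pyRange 0 ((PySem.List.pyGetD tp.2 0 []).length : Int) 1).map (fun col =>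
        (PySem.List.pyGetD (PySem.List.pyGetD tp.2 row []) col "", (tp.1, row, col)))))
  (PySem.List.dedup (pairs.map (fun p => p.1))).map
    (fun k => (k, (pairs.filter (fun p => p.1 == k)).map (fun p => p.2)))

-- ===== PRECONDITION & SPEC =====
-- Pre_ excludes exactly the jagged tables on which Python A raises IndexError: some row of a
-- table is shorter than the table's first row (columns are scanned up to len(table[0])).
def Pre_generate_number_dict (tables : List (List (List String))) : Prop :=
  ∀ t ∈ tables, ∀ r ∈ t, (t.headD []).length ≤ r.length
instance (tables : List (List (List String))) : Decidable (Pre_generate_number_dict tables) := by unfold Pre_generate_number_dict; infer_instance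
def pvWitness_generate_number_dict : List (List (List String)) := [[["1", "2"], ["3", "1"]], [["2"]]]
def Spec_generate_number_dict (tables : List (List (List String))) (out : List (String × List (Int × Int × Int))) : Prop := out = generate_number_dict_alt tables
instance (tables : List (List (List String))) (out : List (String × List (Int × Int × Int))) : Decidable (Spec_generate_number_dict tables out) := by unfold Spec_generate_number_dict; infer_instance

-- ===== CLAIM (what is proved, stated in full; the proofs are below) =====
def Claim_equal_generate_number_dict : Prop := ∀ (tables : List (List (List String))), Dom_generate_number_dict tables → Pre_generate_number_dict tables → Spec_generate_number_dict tables (generate_number_dict tables)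

-- ===== LEMMAS AND PROOFS =====

-- A's loop body ("create empty entry if absent, then append") is exactly Dict.modify with default [].
lemma gnd_step_eq (d : PySem.Dict String (List (Int × Int × Int))) (k : String) (v : Int × Int × Int) :
    (if d.contains k then d else d.insert k []).modify k [] (fun l => l ++ [v])
      = d.modify k [] (fun l => l ++ [v]) := by
  by_cases hc : d.contains k = true
  · simp [hc]
  · simp only [Bool.not_eq_true] at hc
    simp [hc, PySem.Dict.modify, PySem.Dict.getD_insert_self, PySem.Dict.insert_insert_self,
      PySem.Dict.getD_of_not_contains _ _ hc]

-- Folding the append-modify step over a flat pair list groups the pairs by first-occurrence key.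
lemma gnd_items_fold (ps : List (String × (Int × Int × Int))) :
    (ps.foldl (fun d p => d.modify p.1 [] (fun l => l ++ [p.2])) PySem.Dict.empty).items
      = (PySem.List.dedup (ps.map (fun p => p.1))).map
          (fun k => (k, (ps.filter (fun p => p.1 == k)).map (fun p => p.2))) := by
  rw [PySem.Dict.items_eq_map_keys _
    (PySem.Dict.nodup_keys_foldl_modify_key ps (fun p => p.1) [] (fun _ p v => v ++ [p.2])
      PySem.Dict.empty (by simp)) []]
  have hk : (ps.foldl (fun d p => d.modify p.1 [] (fun l => l ++ [p.2])) PySem.Dict.empty).keys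
      = PySem.List.dedup (ps.map (fun p => p.1)) := by
    rw [PySem.Dict.keys_foldl_modify_key ps (fun p => p.1) [] (fun _ p v => v ++ [p.2])]
    simp [PySem.Dict.keys_empty, PySem.List.dedup_eq_ofList, PySem.Set.update, PySem.Set.ofList]
  rw [hk]
  apply List.map_congr_left
  intro k _
  rw [PySem.Dict.getD_foldl_modify_append]
  simp [PySem.Dict.getD_empty]

-- ===== VERDICT (by name: the statement is the Claim_ definition above) =====
theorem generate_number_dict_spec : Claim_equal_generate_number_dict := by
  intro tables _ _
  unfold Spec_generate_number_dict generate_number_dict generate_number_dict_alt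
  simp only []
  rw [← gnd_items_fold]
  simp only [List.foldl_flatMap, List.foldl_map, gnd_step_eq]
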